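-- pv_equiv track=rewrite | github.com/AleksandrAly/HackerRank | 30 Days of Code/Day 10.py | Num_1
-- ===== SOURCE A (Python) =====
-- def Num_1(n):
--     n_bin = str(bin(n))[2:]
--     max_len_1 = 0
--     len_1 = 0
--     n_bin = list(n_bin)
--     for i in range(len(n_bin)):
--         if n_bin[i] == '1':
--             len_1 += 1
--         if n_bin[i] == '0':
--             if len_1 > max_len_1:
--                 max_len_1 = len_1
--             len_1 = 0
--         else:
--             if len_1 > max_len_1:
--                 max_len_1 = len_1
--     return max_len_1
-- ===== SOURCE B (Python) =====
-- def Num_1(n):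
--     return max(seg.count('1') for seg in bin(n)[2:].split('0'))
-- ===== Notes on version B (the rewrite author's own statement) =====
-- stated objective: simpler
-- what changed: Replaces the stateful bit-by-bit accumulator scan with a two-phase split-on-'0' then max of per-segment '1'-counts.
import Mathlib
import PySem

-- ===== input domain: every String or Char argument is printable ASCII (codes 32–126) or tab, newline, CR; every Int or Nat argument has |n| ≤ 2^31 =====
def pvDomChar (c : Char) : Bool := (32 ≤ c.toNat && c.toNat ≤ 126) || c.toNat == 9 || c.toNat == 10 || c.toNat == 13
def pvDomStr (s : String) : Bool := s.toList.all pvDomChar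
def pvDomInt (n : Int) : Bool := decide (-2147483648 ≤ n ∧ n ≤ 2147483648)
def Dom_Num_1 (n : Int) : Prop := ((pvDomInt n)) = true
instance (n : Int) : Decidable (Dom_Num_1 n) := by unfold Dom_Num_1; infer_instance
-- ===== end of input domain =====

-- B replaces A's stateful bit-by-bit scan with split-on-'0' then max of per-segment '1'-counts (objective: simpler).

-- ===== PORT A =====
-- shared helper: Python's bin(n) as a list of characters (exact: '0b'/-0b prefix + binary digits)
def natBinAux (k : Nat) : List Char :=
  if hk : k = 0 then []
  else natBinAux (k / 2) ++ [if k % 2 = 1 then '1' else '0']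
decreasing_by exact Nat.div_lt_self (Nat.pos_of_ne_zero hk) (by omega)

def binChars (n : Int) : List Char :=
  (if n < 0 then ['-', '0', 'b'] else ['0', 'b']) ++
  (if n.natAbs = 0 then ['0'] else natBinAux n.natAbs)

-- one loop iteration of A (same state (max_len_1, len_1), same branch order)
def stepA (st : Int × Int) (c : Char) : Int × Int :=
  let len1 := if c = '1' then st.2 + 1 else st.2
  if c = '0' then (if len1 > st.1 then len1 else st.1, 0)
  else (if len1 > st.1 then len1 else st.1, len1)

-- bin(n)[2:] is drop 2 here (the bin string always has length ≥ 3, so the slice is exact)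
def Num_1 (n : Int) : Int :=
  (((binChars n).drop 2).foldl stepA (0, 0)).1

-- ===== PORT B =====
-- Python str.split('0') ported by hand: splits at every '0', keeping empty segments (exact)
def pySplit0 : List Char → List (List Char)
  | [] => [[]]
  | c :: t =>
    match pySplit0 t with
    | [] => [[]]  -- unreachable: pySplit0 always returns a nonempty list
    | seg :: rest => if c = '0' then [] :: seg :: rest else (c :: seg) :: rest

-- max(seg.count('1') for seg in bin(n)[2:].split('0')); the generator is never empty
def Num_1_alt (n : Int) : Int :=
  match (pySplit0 ((binChars n).drop 2)).map (fun seg => (seg.count '1' : Int)) with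
  | h :: t => t.foldl max h
  | [] => 0  -- unreachable: split always yields at least one segment

-- ===== PRECONDITION & SPEC =====
def Spec_Num_1 (n : Int) (out : Int) : Prop := out = Num_1_alt n
instance (n : Int) (out : Int) : Decidable (Spec_Num_1 n out) := by unfold Spec_Num_1; infer_instance

-- ===== CLAIM (what is proved, stated in full; the proofs are below) =====
def Claim_equal_Num_1 : Prop := ∀ (n : Int), Dom_Num_1 n → Spec_Num_1 n (Num_1 n)

-- ===== LEMMAS AND PROOFS =====

theorem if_gt_max (m l : Int) : (if l > m then l else m) = max m l := by
  rw [Int.max_def]; split_ifs <;> omega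

-- the "longest run of 1s remaining, given l ones pending" functional
def Rrun (l : Int) : List Char → Int
  | [] => l
  | c :: t => if c = '0' then max l (Rrun 0 t)
              else if c = '1' then Rrun (l + 1) t
              else Rrun l t

theorem Rrun_ge (s : List Char) : ∀ (l : Int), l ≤ Rrun l s := by
  induction s with
  | nil => intro l; simp [Rrun]
  | cons c t ih =>
    intro l
    simp only [Rrun]
    split_ifs with h0 h1
    · exact le_max_left _ _
    · exact le_trans (by omega) (ih (l + 1))
    · exact ih l

theorem foldA_eq_Rrun (s : List Char) : ∀ (m l : Int), 0 ≤ l → l ≤ m →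
    (s.foldl stepA (m, l)).1 = max m (Rrun l s) := by
  induction s with
  | nil =>
    intro m l hl0 hl
    have h1 : (List.foldl stepA (m, l) []).1 = m := rfl
    rw [h1]
    show m = max m (Rrun l [])
    rw [show Rrun l [] = l from rfl, Int.max_def]
    split_ifs <;> omega
  | cons c t ih =>
    intro m l hl0 hl
    simp only [List.foldl, Rrun, stepA]
    by_cases h0 : c = '0'
    · subst h0
      simp only [show (('0' : Char) = '1') = False from by simp, if_true, if_false]
      rw [ih _ _ le_rfl (by rw [if_gt_max]; exact le_max_of_le_left (le_trans hl0 hl)),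
        if_gt_max, max_assoc]
    · by_cases h1 : c = '1'
      · subst h1
        simp only [show (('1' : Char) = '0') = False from by simp, if_true, if_false]
        rw [ih _ _ (by omega) (by rw [if_gt_max]; exact le_max_right _ _), if_gt_max, max_assoc]
        have hge := Rrun_ge t (l + 1)
        congr 1
        omega
      · simp only [if_neg h0, if_neg h1]
        rw [ih _ _ hl0 (by rw [if_gt_max]; exact le_max_right _ _), if_gt_max, max_assoc]
        have hge := Rrun_ge t l
        congr 1
        omega

theorem foldl_max_init (xs : List Int) : ∀ (a b : Int),
    xs.foldl max (max a b) = max a (xs.foldl max b) := by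
  induction xs with
  | nil => intro a b; simp [List.foldl]
  | cons x t ih =>
    intro a b
    simp only [List.foldl]
    rw [max_assoc, ih]

-- pySplit0 always returns at least one segment
theorem pySplit0_ne_nil (s : List Char) : pySplit0 s ≠ [] := by
  cases s with
  | nil => simp [pySplit0]
  | cons c t =>
    simp only [pySplit0]
    rcases hsp : pySplit0 t with _ | ⟨h', rest⟩
    · simp
    · split_ifs <;> simp

theorem Rrun_eq_split (s : List Char) : ∀ (l : Int),
    Rrun l s =
      match (pySplit0 s).map (fun seg => (seg.count '1' : Int)) with
      | h :: t => t.foldl max (l + h)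
      | [] => l := by
  induction s with
  | nil => intro l; simp [Rrun, pySplit0]
  | cons c t ih =>
    intro l
    rcases hsp : pySplit0 t with _ | ⟨h, rest⟩
    · exact absurd hsp (pySplit0_ne_nil t)
    · simp only [Rrun, pySplit0, hsp]
      by_cases h0 : c = '0'
      · subst h0
        simp only [if_true, List.map, List.foldl]
        rw [ih 0, hsp]
        simp only [List.map, List.count_nil, Nat.cast_zero, add_zero, zero_add]
        rw [foldl_max_init]
      · by_cases h1 : c = '1'
        · subst h1
          simp only [show (('1' : Char) = '0') = False from by simp, if_true, if_false, List.map]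
          rw [ih (l + 1), hsp]
          simp only [List.map, List.count_cons]
          congr 1
          simp
          omega
        · simp only [if_neg h0, if_neg h1, List.map]
          rw [ih l, hsp]
          simp only [List.map, List.count_cons]
          congr 2
          simp [h1]

-- ===== VERDICT (by name: the statement is the Claim_ definition above) =====
theorem Num_1_spec : Claim_equal_Num_1 := by
  intro n _
  unfold Spec_Num_1 Num_1 Num_1_alt
  rw [foldA_eq_Rrun _ _ _ le_rfl le_rfl, max_eq_right (Rrun_ge _ 0), Rrun_eq_split]
  rcases hsp : pySplit0 ((binChars n).drop 2) with _ | ⟨h, rest⟩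
  · exact absurd hsp (pySplit0_ne_nil _)
  · simp
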